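-- pv_equiv track=rewrite | github.com/Kangsan-Jeon/AlgorithmTrain | SW_ExpertAcademy/[완] 4012_요리사.py | calTaste
-- ===== SOURCE A (Python) =====
-- def calTaste(synergy, foods):
--     n = len(foods)
--     taste = 0
--     for i in range(n):
--         f1 = foods[i]
--         for j in range(i+1, n):
--             f2 = foods[j]
--             taste = taste + synergy[f1][f2] + synergy[f2][f1]
--     return taste
-- ===== SOURCE B (Python) =====
-- def calTaste(synergy, foods):
--     total = 0
--     for a in foods:
--         for b in foods:
--             total += synergy[a][b]
--     for a in foods:
--         total -= synergy[a][a]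
--     return total
-- ===== Notes on version B (the rewrite author's own statement) =====
-- stated objective: alternative
-- what changed: B replaces A's triangular i<j index loop (adding synergy[f1][f2]+synergy[f2][f1] per unordered pair) by a full block sum over all ordered pairs of foods minus the diagonal terms.
-- outside the precondition, e.g. on calTaste([], [5]): A returns 0, B raises IndexError; on calTaste([[0, 1], [2]], [0, 1]): A returns 3, B raises IndexError
import Mathlib
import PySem

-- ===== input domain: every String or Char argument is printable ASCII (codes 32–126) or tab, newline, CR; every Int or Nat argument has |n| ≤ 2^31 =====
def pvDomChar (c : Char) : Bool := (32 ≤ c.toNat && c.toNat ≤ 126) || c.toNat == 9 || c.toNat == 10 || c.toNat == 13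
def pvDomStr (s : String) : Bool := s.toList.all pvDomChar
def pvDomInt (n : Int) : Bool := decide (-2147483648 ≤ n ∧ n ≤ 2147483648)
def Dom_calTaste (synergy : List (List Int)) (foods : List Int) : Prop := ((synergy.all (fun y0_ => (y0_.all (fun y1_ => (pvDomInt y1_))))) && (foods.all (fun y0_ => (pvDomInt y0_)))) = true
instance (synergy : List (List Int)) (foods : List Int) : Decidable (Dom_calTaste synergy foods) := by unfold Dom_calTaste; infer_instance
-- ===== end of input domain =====

-- B computes the full block sum over all ordered pairs of foods and subtracts the
-- diagonal, instead of A's triangular i<j index loop (alternative decomposition).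

-- synergy[a][b] (total form; Pre_ guarantees both lookups are in range)
def pvSg (synergy : List (List Int)) (a b : Int) : Int :=
  PySem.List.pyGetD (PySem.List.pyGetD synergy a []) b 0

-- ===== PORT A =====
def calTaste (synergy : List (List Int)) (foods : List Int) : Int :=
  let n : Int := foods.length
  (PySem.List.pyRange 0 n 1).foldl (fun taste i =>
    let f1 := PySem.List.pyGetD foods i 0
    (PySem.List.pyRange (i + 1) n 1).foldl (fun t j =>
      let f2 := PySem.List.pyGetD foods j 0
      t + pvSg synergy f1 f2 + pvSg synergy f2 f1) taste) 0

-- ===== PORT B =====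
def calTaste_alt (synergy : List (List Int)) (foods : List Int) : Int :=
  let total := foods.foldl (fun t a =>
    foods.foldl (fun t b => t + pvSg synergy a b) t) 0
  foods.foldl (fun t a => t - pvSg synergy a a) total

-- ===== PRECONDITION & SPEC =====
-- Pre_ excludes inputs on which some foods×foods lookup synergy[a][b] is out of range:
-- A returns there whenever it never reaches the bad lookup (fewer than two foods, or a
-- ragged row only the diagonal/block sum touches) while B's block sum raises IndexError.
def Pre_calTaste (synergy : List (List Int)) (foods : List Int) : Prop :=
  ∀ a ∈ foods, PySem.Raise.InRange synergy.length a ∧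
    ∀ b ∈ foods, PySem.Raise.InRange (PySem.List.pyGetD synergy a []).length b
instance (synergy : List (List Int)) (foods : List Int) : Decidable (Pre_calTaste synergy foods) := by unfold Pre_calTaste; infer_instance

def pvWitness_calTaste : List (List Int) × List Int := ([[1, 2], [3, 4]], [0, 1, 0])

def Spec_calTaste (synergy : List (List Int)) (foods : List Int) (out : Int) : Prop := out = calTaste_alt synergy foods
instance (synergy : List (List Int)) (foods : List Int) (out : Int) : Decidable (Spec_calTaste synergy foods out) := by unfold Spec_calTaste; infer_instance

-- ===== CLAIM (what is proved, stated in full; the proofs are below) =====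
def Claim_equal_calTaste : Prop := ∀ (synergy : List (List Int)) (foods : List Int), Dom_calTaste synergy foods → Pre_calTaste synergy foods → Spec_calTaste synergy foods (calTaste synergy foods)

-- ===== LEMMAS AND PROOFS =====

-- the sum over unordered pairs, structurally over the list
def pvPairs (synergy : List (List Int)) : List Int → Int
  | [] => 0
  | f :: r => (r.map (fun g => pvSg synergy f g + pvSg synergy g f)).sum + pvPairs synergy r

-- block sum minus diagonal equals the unordered-pair sum
theorem pvBlock_eq_pairs (synergy : List (List Int)) (L : List Int) :
    (L.map (fun a => (L.map (fun b => pvSg synergy a b)).sum)).sum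
      - (L.map (fun a => pvSg synergy a a)).sum = pvPairs synergy L := by
  induction L with
  | nil => simp [pvPairs]
  | cons f r ih =>
    simp only [List.map_cons, List.sum_cons, pvPairs,
      PySem.List.sum_map_add_int] at *
    linarith

theorem pvSumNeg (g : Int → Int) (l : List Int) :
    (l.map (fun a => -(g a))).sum = -((l.map g).sum) := by
  induction l with
  | nil => simp
  | cons x r ih => simp [ih]; ring

theorem pvAlt_eq_pairs (synergy : List (List Int)) (foods : List Int) :
    calTaste_alt synergy foods = pvPairs synergy foods := by
  unfold calTaste_alt
  dsimp only
  simp only [sub_eq_add_neg, PySem.List.foldl_add, zero_add]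
  rw [pvSumNeg (fun a => pvSg synergy a a) foods, ← pvBlock_eq_pairs synergy foods]
  ring

-- the index form of the triangular sum, over Nat indices
theorem pvTri_eq_pairs (synergy : List (List Int)) (L : List Int) :
    ((List.range L.length).map (fun k =>
      ((L.drop (k+1)).map (fun g =>
        pvSg synergy (L.getD k 0) g + pvSg synergy g (L.getD k 0))).sum)).sum
      = pvPairs synergy L := by
  induction L with
  | nil => simp [pvPairs]
  | cons f r ih =>
    rw [List.length_cons, List.range_succ_eq_map]
    simp only [List.map_cons, List.sum_cons, List.map_map, pvPairs]
    rw [← ih]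
    refine congrArg₂ (· + ·) rfl ?_
    apply congrArg List.sum
    apply List.map_congr_left
    intro k _
    simp [Function.comp]

theorem pvA_eq_pairs (synergy : List (List Int)) (foods : List Int) :
    calTaste synergy foods = pvPairs synergy foods := by
  unfold calTaste
  dsimp only
  simp only [add_assoc, PySem.List.foldl_add, zero_add]
  rw [← pvTri_eq_pairs synergy foods, PySem.List.pyRange_one]
  simp only [List.map_map, sub_zero, Int.toNat_natCast]
  apply congrArg List.sum
  apply List.map_congr_left
  intro k hk
  simp only [Function.comp, zero_add, PySem.List.pyGetD_natCast]
  have h2 : (PySem.List.pyRange ((k:Int)+1) (foods.length:Int) 1).map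
      (fun j => PySem.List.pyGetD foods j 0) = foods.drop ((k:Int)+1).toNat := by
    exact PySem.List.map_pyGetD_pyRange' foods 0 (by omega)
  have h3 : ((k:Int)+1).toNat = k + 1 := by omega
  rw [← h3, ← h2, List.map_map]
  rfl

-- ===== VERDICT (by name: the statement is the Claim_ definition above) =====
theorem calTaste_spec : Claim_equal_calTaste := by
  intro synergy foods _ _
  unfold Spec_calTaste
  rw [pvA_eq_pairs, pvAlt_eq_pairs]
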